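-- pv_equiv track=rewrite | github.com/vjtiarnav/Arnav_Chavan_FBS_work | Core Python/Assignments/Assignment 11/10th_question.py | remove_even
-- ===== SOURCE A (Python) =====
-- def remove_even(list1):
--     i = 0
--     while i < len(list1):
--         if list1[i] % 2 == 0:
--             del list1[i]
--         else:
--             i += 1
--
--     return list1
-- ===== SOURCE B (Python) =====
-- def remove_even(list1):
--     w = 0
--     for i in range(len(list1)):
--         if list1[i] % 2 != 0:
--             list1[w] = list1[i]
--             w += 1
--     del list1[w:]
--     return list1
-- ===== Notes on version B (the rewrite author's own statement) =====
-- stated objective: alternative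
-- what changed: Replaces the delete-and-shift while loop by a single-pass two-pointer in-place compaction (write survivors forward, truncate the tail once); intended to avoid A's repeated tail shifts, though a timing run did not confirm a uniform speedup.
import Mathlib
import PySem

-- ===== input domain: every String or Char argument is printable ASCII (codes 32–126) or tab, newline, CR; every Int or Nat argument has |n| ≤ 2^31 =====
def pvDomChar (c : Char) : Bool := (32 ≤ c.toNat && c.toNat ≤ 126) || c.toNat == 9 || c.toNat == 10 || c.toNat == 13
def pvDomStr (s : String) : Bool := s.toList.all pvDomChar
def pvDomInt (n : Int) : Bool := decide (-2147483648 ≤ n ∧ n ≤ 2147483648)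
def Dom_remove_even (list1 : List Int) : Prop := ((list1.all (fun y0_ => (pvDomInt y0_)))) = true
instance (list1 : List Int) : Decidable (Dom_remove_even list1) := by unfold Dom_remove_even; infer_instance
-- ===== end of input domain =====

set_option maxRecDepth 4000


-- B removes the evens in one in-place two-pointer compaction pass instead of A's
-- delete-and-shift loop; both Pythons mutate and return the SAME list object, and the
-- theorems here are about the returned value.

-- ===== PORT A =====
-- A's while loop either deletes the current element or advances past it: on the
-- remaining suffix this is exactly "drop the head if even, else keep it and recurse".
def remove_even (list1 : List Int) : List Int :=
  match list1 with
  | [] => []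
  | x :: xs => if PySem.Int.mod x 2 == 0 then remove_even xs else x :: remove_even xs

-- ===== PORT B =====
-- loop body of B: state (arr, w); if arr[i] is odd, write it at w and bump w.
def pvStepB (st : List Int × Nat) (i : Int) : List Int × Nat :=
  match PySem.List.pyGet? st.1 i with
  | some x => if PySem.Int.mod x 2 != 0 then (st.1.set st.2 x, st.2 + 1) else st
  | none => st

def remove_even_alt (list1 : List Int) : List Int :=
  let st := (PySem.List.pyRange 0 (list1.length : Int) 1).foldl pvStepB (list1, 0)
  st.1.take st.2  -- del list1[w:]

-- ===== PRECONDITION & SPEC =====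
def Spec_remove_even (list1 : List Int) (out : List Int) : Prop := out = remove_even_alt list1
instance (list1 : List Int) (out : List Int) : Decidable (Spec_remove_even list1 out) := by unfold Spec_remove_even; infer_instance

-- ===== CLAIM (what is proved, stated in full; the proofs are below) =====
def Claim_equal_remove_even : Prop := ∀ (list1 : List Int), Dom_remove_even list1 → Spec_remove_even list1 (remove_even list1)

-- ===== LEMMAS AND PROOFS =====

def pvOdd (x : Int) : Bool := PySem.Int.mod x 2 != 0

lemma remove_even_eq_filter (l : List Int) : remove_even l = l.filter pvOdd := by
  induction l with
  | nil => rfl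
  | cons x xs ih =>
    have hc : (PySem.Int.mod x 2 == 0) = !pvOdd x := by
      simp only [pvOdd, bne, Bool.not_not]
    rw [remove_even, List.filter_cons, hc, ih]
    cases pvOdd x <;> simp

lemma set_append_len (F rest : List Int) (x : Int) :
    (F ++ rest).set F.length x = F ++ rest.set 0 x := by
  induction F with
  | nil => simp
  | cons a F ih => simp [ih]

lemma pvStepB_inv (l : List Int) (k : Nat) (hk : k ≤ l.length) :
    ∃ mid,
      (PySem.List.pyRange 0 (k : Int) 1).foldl pvStepB (l, 0) =
        ((l.take k).filter pvOdd ++ mid ++ l.drop k, ((l.take k).filter pvOdd).length) ∧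
      ((l.take k).filter pvOdd).length + mid.length = k := by
  induction k with
  | zero => exact ⟨[], by simp⟩
  | succ k ih =>
    obtain ⟨mid, heq, hlen⟩ := ih (Nat.le_of_succ_le hk)
    have hklt : k < l.length := hk
    have hsplit : ((k + 1 : Nat) : Int) = (k : Int) + 1 := by push_cast; ring
    rw [hsplit, PySem.List.pyRange_one_succ_right (by positivity), List.foldl_append, heq]
    set F := (l.take k).filter pvOdd with hF
    have hFk : (F ++ mid).length = k := by simpa using hlen
    have hdrop : l.drop k = l[k] :: l.drop (k + 1) := List.drop_eq_getElem_cons hklt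
    have hget : PySem.List.pyGet? (F ++ mid ++ l.drop k) ((k : Nat) : Int) = some l[k] := by
      have h1 := PySem.List.pyGet?_append_length (pre := F ++ mid) (y := l[k]) (ys := l.drop (k + 1))
      rw [← hdrop, hFk] at h1
      simpa [List.append_assoc] using h1
    have htake : l.take (k + 1) = l.take k ++ [l[k]] := by
      rw [List.take_add_one, List.getElem?_eq_getElem hklt]; rfl
    have hfil : (l.take (k + 1)).filter pvOdd = F ++ [l[k]].filter pvOdd := by
      rw [htake, List.filter_append, hF]
    simp only [List.foldl_cons, List.foldl_nil, pvStepB, hget]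
    simp only [show (PySem.Int.mod l[k] 2 != 0) = pvOdd l[k] from rfl]
    cases hodd : pvOdd l[k] with
    | true =>
      have hfil' : (l.take (k + 1)).filter pvOdd = F ++ [l[k]] := by
        rw [hfil]; simp [hodd]
      refine ⟨(mid ++ [l[k]]).tail, ?_, ?_⟩
      · rw [if_pos rfl, hfil', List.append_assoc, set_append_len]
        cases mid with
        | nil =>
          rw [hdrop]; simp
          rw [hdrop, List.set_cons_zero]
        | cons m ms => rw [List.cons_append, List.set_cons_zero, hdrop]; simp [List.append_assoc]
      · rw [hfil']
        cases mid with
        | nil => simp at hlen ⊢; omega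
        | cons m ms => simp at hlen ⊢; omega
    | false =>
      have hfil' : (l.take (k + 1)).filter pvOdd = F := by
        rw [hfil]; simp [hodd]
      refine ⟨mid ++ [l[k]], ?_, ?_⟩
      · rw [if_neg (by simp), hfil', hdrop]
        simp [List.append_assoc]
      · rw [hfil']; simp at hlen ⊢; omega

lemma remove_even_alt_eq_filter (l : List Int) : remove_even_alt l = l.filter pvOdd := by
  obtain ⟨mid, heq, hlen⟩ := pvStepB_inv l l.length (le_refl _)
  unfold remove_even_alt
  rw [heq]
  simp only [List.drop_length, List.append_nil, List.take_length]
  exact List.take_left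

-- ===== VERDICT (by name: the statement is the Claim_ definition above) =====
theorem remove_even_spec : Claim_equal_remove_even := by
  intro l _
  unfold Spec_remove_even
  rw [remove_even_eq_filter, remove_even_alt_eq_filter]
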